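-- pv_equiv track=rewrite | github.com/sabi-h/qpyr | qpyr/_lib/draw.py | get_version_information
-- ===== SOURCE A (Python) =====
-- from typing import Callable, Dict, List, Optional, Tuple
--
-- def get_version_information(version: int) -> Optional[int]:
--     if version <= 6:
--         return
--
--     generator_polynomial = 7973
--
--     data: int = version
--     rem: int = data
--     for _ in range(12):
--         rem = (rem << 1) ^ ((rem >> 11) * generator_polynomial)
--     bits: int = data << 12 | rem
--     assert bits >> 18 == 0
--     return bits
-- ===== SOURCE B (Python) =====
-- def get_version_information(version: int):
--     if version <= 6:
--         return
--     data = version << 12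
--     rem = data
--     while rem.bit_length() > 12:
--         rem ^= 7973 << (rem.bit_length() - 13)
--     bits = data | rem
--     assert bits >> 18 == 0
--     return bits
-- ===== Notes on version B (the rewrite author's own statement) =====
-- stated objective: alternative
-- what changed: B computes the BCH remainder by polynomial long division on version<<12, XORing the shifted generator at the current bit_length until it fits in 12 bits, instead of A's fixed 12-iteration serial LFSR shift loop.
import Mathlib
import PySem

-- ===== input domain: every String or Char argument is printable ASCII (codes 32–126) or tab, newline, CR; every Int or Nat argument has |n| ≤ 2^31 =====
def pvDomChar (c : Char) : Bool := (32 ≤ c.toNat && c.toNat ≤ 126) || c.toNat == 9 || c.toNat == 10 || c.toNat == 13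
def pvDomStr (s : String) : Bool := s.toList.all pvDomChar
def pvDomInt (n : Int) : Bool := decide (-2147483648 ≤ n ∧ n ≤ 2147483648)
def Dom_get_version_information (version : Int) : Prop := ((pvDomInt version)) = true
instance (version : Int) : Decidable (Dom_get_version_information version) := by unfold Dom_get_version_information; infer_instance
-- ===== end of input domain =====

-- B replaces A's fixed 12-step LFSR with standard polynomial long division driven by bit_length (alternative decomposition, same cost).

-- ===== PORT A =====
-- In the else-branch version ≥ 7, so all quantities are nonnegative: Nat <<< / >>> / ^^^ are
-- exact for Python's int shifts and xor there. The failing `assert` (bits >> 18 ≠ 0, i.e.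
-- version ≥ 64) raises AssertionError in Python and is excluded by Pre_.
def get_version_information (version : Int) : Option Int :=
  if version ≤ 6 then none
  else
    let data : Nat := version.toNat
    let rem : Nat := (List.range 12).foldl (fun r _ => (r <<< 1) ^^^ ((r >>> 11) * 7973)) data
    let bits : Nat := data <<< 12 ||| rem
    if bits >>> 18 = 0 then some (Int.ofNat bits) else none

-- ===== PORT B =====
-- Python's rem.bit_length() is Nat.size. Each division step XORs away the top bit of rem,
-- so rem.size is a sufficient fuel bound for the while-loop (loop guard unchanged).
def bchStep (rem : Nat) : Nat := rem ^^^ (7973 <<< (rem.size - 13))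

def bchLoop : Nat → Nat → Nat
  | 0, rem => rem
  | fuel + 1, rem => if 12 < rem.size then bchLoop fuel (bchStep rem) else rem

def get_version_information_alt (version : Int) : Option Int :=
  if version ≤ 6 then none
  else
    let data : Nat := version.toNat <<< 12
    let rem : Nat := bchLoop data.size data
    let bits : Nat := data ||| rem
    if bits >>> 18 = 0 then some (Int.ofNat bits) else none

-- ===== PRECONDITION & SPEC =====
-- Pre_ excludes version ≥ 64, where Python A's `assert bits >> 18 == 0` raises AssertionError.
def Pre_get_version_information (version : Int) : Prop := version ≤ 63
instance (version : Int) : Decidable (Pre_get_version_information version) := by unfold Pre_get_version_information; infer_instance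
def pvWitness_get_version_information : Int := 7

def Spec_get_version_information (version : Int) (out : Option Int) : Prop := out = get_version_information_alt version
instance (version : Int) (out : Option Int) : Decidable (Spec_get_version_information version out) := by unfold Spec_get_version_information; infer_instance

-- ===== CLAIM (what is proved, stated in full; the proofs are below) =====
def Claim_equal_get_version_information : Prop := ∀ (version : Int), Dom_get_version_information version → Pre_get_version_information version → Spec_get_version_information version (get_version_information version)

-- ===== LEMMAS AND PROOFS =====
lemma gvi_fin : ∀ n : Fin 57,
    get_version_information ((7 + n.val : Nat) : Int) = get_version_information_alt ((7 + n.val : Nat) : Int) := by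
  decide

-- ===== VERDICT (by name: the statement is the Claim_ definition above) =====
theorem get_version_information_spec : Claim_equal_get_version_information := by
  intro v _ hpre
  unfold Pre_get_version_information at hpre
  unfold Spec_get_version_information
  by_cases h6 : v ≤ 6
  · simp [get_version_information, get_version_information_alt, h6]
  · have h7 : 7 ≤ v := by omega
    have hn : ((v - 7).toNat : Int) = v - 7 := Int.toNat_of_nonneg (by omega)
    have hv : v = ((7 + (v - 7).toNat : Nat) : Int) := by push_cast; omega
    have hlt : (v - 7).toNat < 57 := by omega
    rw [hv]
    exact gvi_fin ⟨(v - 7).toNat, hlt⟩
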